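-- pv_equiv track=rewrite | github.com/avansledright/fantasy-football-agent | terraform/coach_lambda/app/player_data.py | _generate_injury_recommendation
-- ===== SOURCE A (Python) =====
-- from typing import Dict, Any, List, Optional
--
-- def _generate_injury_recommendation(injured_players: List[Dict], healthy_alternatives: Dict) -> str:
--     """Generate injury-based lineup recommendations."""
--     if not injured_players:
--         return "No injury concerns. Proceed with normal optimization."
--
--     critical_injuries = [p for p in injured_players if p["severity"] == "Critical"]
--
--     if critical_injuries:
--         critical_names = [p["name"] for p in critical_injuries]
--         return f"AVOID: {', '.join(critical_names)} should not be started due to critical injury status."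
--
--     risky_injuries = [p for p in injured_players if p["severity"] == "High"]
--     if risky_injuries:
--         risky_names = [p["name"] for p in risky_injuries]
--         return f"CAUTION: {', '.join(risky_names)} are high-risk due to injury. Consider healthy alternatives."
--
--     return "Monitor questionable players closely. Consider healthy alternatives if available."
-- ===== SOURCE B (Python) =====
-- _RANK = {"Critical": 2, "High": 1}
-- _FMT = {
--     2: "AVOID: {} should not be started due to critical injury status.",
--     1: "CAUTION: {} are high-risk due to injury. Consider healthy alternatives.",
-- }
--
-- def _generate_injury_recommendation(injured_players, healthy_alternatives):
--     """Argmax-severity: rank players numerically, select the top rank, format via a table."""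
--     if not injured_players:
--         return "No injury concerns. Proceed with normal optimization."
--     top = max(_RANK.get(p["severity"], 0) for p in injured_players)
--     if top == 0:
--         return "Monitor questionable players closely. Consider healthy alternatives if available."
--     names = ", ".join(p["name"] for p in injured_players
--                       if _RANK.get(p["severity"], 0) == top)
--     return _FMT[top].format(names)
-- ===== Notes on version B (the rewrite author's own statement) =====
-- stated objective: alternative
-- what changed: A does priority-ordered filter scans per severity string with an early return per group; B maps each player to a numeric rank, computes the maximum rank (argmax) in one pass, then selects the players attaining that rank and formats the message from a rank-indexed table.
import Mathlib
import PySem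

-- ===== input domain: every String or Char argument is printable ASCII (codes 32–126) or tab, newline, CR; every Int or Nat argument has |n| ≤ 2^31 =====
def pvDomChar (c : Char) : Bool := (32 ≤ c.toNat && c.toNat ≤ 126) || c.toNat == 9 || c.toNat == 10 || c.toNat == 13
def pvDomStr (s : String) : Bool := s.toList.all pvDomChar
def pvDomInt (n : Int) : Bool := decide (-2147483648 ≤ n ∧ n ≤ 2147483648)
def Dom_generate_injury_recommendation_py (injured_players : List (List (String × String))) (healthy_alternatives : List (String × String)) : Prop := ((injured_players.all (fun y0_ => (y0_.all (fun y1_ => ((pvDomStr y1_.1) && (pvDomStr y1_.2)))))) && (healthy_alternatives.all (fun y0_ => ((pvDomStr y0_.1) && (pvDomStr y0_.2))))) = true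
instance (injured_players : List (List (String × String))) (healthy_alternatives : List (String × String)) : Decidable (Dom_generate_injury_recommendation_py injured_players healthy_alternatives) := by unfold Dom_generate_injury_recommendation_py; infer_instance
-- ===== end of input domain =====

-- B replaces A's priority-ordered severity filter scans by a numeric argmax: rank players, take the max rank, select the players attaining it, format from a rank table (alternative algorithm, same cost).


-- ===== PORT A =====
-- p["k"] on an association-list dict: first match (exact; none = KeyError, excluded by Pre_)
def pvGetKey (p : List (String × String)) (k : String) : Option String :=
  (p.find? (fun kv => kv.1 == k)).map (·.2)

def generate_injury_recommendation_py (injured_players : List (List (String × String))) (healthy_alternatives : List (String × String)) : String :=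
  if injured_players.isEmpty then
    "No injury concerns. Proceed with normal optimization."
  else
    let critical_injuries := injured_players.filter (fun p => pvGetKey p "severity" == some "Critical")
    if critical_injuries.isEmpty = false then
      let critical_names := critical_injuries.map (fun p => (pvGetKey p "name").getD "")
      "AVOID: " ++ PySem.Str.join ", " critical_names ++ " should not be started due to critical injury status."
    else
      let risky_injuries := injured_players.filter (fun p => pvGetKey p "severity" == some "High")
      if risky_injuries.isEmpty = false then
        let risky_names := risky_injuries.map (fun p => (pvGetKey p "name").getD "")
        "CAUTION: " ++ PySem.Str.join ", " risky_names ++ " are high-risk due to injury. Consider healthy alternatives."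
      else
        "Monitor questionable players closely. Consider healthy alternatives if available."

-- ===== PORT B =====
-- _RANK.get(p["severity"], 0)
def pvRank (p : List (String × String)) : Nat :=
  if pvGetKey p "severity" == some "Critical" then 2
  else if pvGetKey p "severity" == some "High" then 1
  else 0

-- max(...) over the nonempty generator of ranks
def pvMaxRank : List (List (String × String)) → Nat
  | [] => 0
  | p :: ps => ps.foldl (fun m q => max m (pvRank q)) (pvRank p)

-- _FMT[top].format(names), top ∈ {1, 2}
def pvFmt (top : Nat) (names : String) : String :=
  if top == 2 then "AVOID: " ++ names ++ " should not be started due to critical injury status."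
  else "CAUTION: " ++ names ++ " are high-risk due to injury. Consider healthy alternatives."

def generate_injury_recommendation_py_alt (injured_players : List (List (String × String))) (healthy_alternatives : List (String × String)) : String :=
  if injured_players.isEmpty then
    "No injury concerns. Proceed with normal optimization."
  else
    let top := pvMaxRank injured_players
    if top == 0 then
      "Monitor questionable players closely. Consider healthy alternatives if available."
    else
      let names := PySem.Str.join ", "
        ((injured_players.filter (fun p => pvRank p == top)).map (fun p => (pvGetKey p "name").getD ""))
      pvFmt top names

-- ===== PRECONDITION & SPEC =====
-- Pre_ excludes exactly the inputs where A raises KeyError: a player without a "severity" key,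
-- or a player in the reported group (Critical if any, else High if any) without a "name" key.
def Pre_generate_injury_recommendation_py (injured_players : List (List (String × String))) (healthy_alternatives : List (String × String)) : Prop :=
  (injured_players.all (fun p => (pvGetKey p "severity").isSome)
   && (if injured_players.any (fun p => pvGetKey p "severity" == some "Critical") then
         injured_players.all (fun p => !(pvGetKey p "severity" == some "Critical") || (pvGetKey p "name").isSome)
       else if injured_players.any (fun p => pvGetKey p "severity" == some "High") then
         injured_players.all (fun p => !(pvGetKey p "severity" == some "High") || (pvGetKey p "name").isSome)
       else true)) = true
instance (injured_players : List (List (String × String))) (healthy_alternatives : List (String × String)) : Decidable (Pre_generate_injury_recommendation_py injured_players healthy_alternatives) := by unfold Pre_generate_injury_recommendation_py; infer_instance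

def pvWitness_generate_injury_recommendation_py : (List (List (String × String))) × (List (String × String)) :=
  ([[("severity", "High"), ("name", "Bob")], [("severity", "Questionable"), ("name", "Al")]], [])

def Spec_generate_injury_recommendation_py (injured_players : List (List (String × String))) (healthy_alternatives : List (String × String)) (out : String) : Prop := out = generate_injury_recommendation_py_alt injured_players healthy_alternatives
instance (injured_players : List (List (String × String))) (healthy_alternatives : List (String × String)) (out : String) : Decidable (Spec_generate_injury_recommendation_py injured_players healthy_alternatives out) := by unfold Spec_generate_injury_recommendation_py; infer_instance

-- ===== CLAIM (what is proved, stated in full; the proofs are below) =====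
def Claim_equal_generate_injury_recommendation_py : Prop := ∀ (injured_players : List (List (String × String))) (healthy_alternatives : List (String × String)), Dom_generate_injury_recommendation_py injured_players healthy_alternatives → Pre_generate_injury_recommendation_py injured_players healthy_alternatives → Spec_generate_injury_recommendation_py injured_players healthy_alternatives (generate_injury_recommendation_py injured_players healthy_alternatives)

-- ===== LEMMAS AND PROOFS =====

-- the severity-priority value A's branch order encodes, as a function of the input
def pvTopOf (xs : List (List (String × String))) : Nat :=
  if xs.any (fun p => pvGetKey p "severity" == some "Critical") then 2
  else if xs.any (fun p => pvGetKey p "severity" == some "High") then 1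
  else 0

theorem pvTopOf_cons (p : List (String × String)) (xs : List (List (String × String))) :
    pvTopOf (p :: xs) = max (pvRank p) (pvTopOf xs) := by
  simp only [pvTopOf, List.any_cons, pvRank]
  by_cases h1 : (pvGetKey p "severity" == some "Critical") <;>
    by_cases h2 : (pvGetKey p "severity" == some "High") <;>
      by_cases h3 : xs.any (fun q => pvGetKey q "severity" == some "Critical") <;>
        by_cases h4 : xs.any (fun q => pvGetKey q "severity" == some "High") <;>
          simp [h1, h2, h3, h4]

theorem pvFoldl_max (xs : List (List (String × String))) (m : Nat) :
    xs.foldl (fun m q => max m (pvRank q)) m = max m (pvTopOf xs) := by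
  induction xs generalizing m with
  | nil => simp [pvTopOf]
  | cons p xs ih =>
    rw [List.foldl_cons, ih, pvTopOf_cons]
    omega

theorem pvMaxRank_eq (xs : List (List (String × String))) : pvMaxRank xs = pvTopOf xs := by
  cases xs with
  | nil => simp [pvMaxRank, pvTopOf]
  | cons p ps => rw [pvMaxRank, pvFoldl_max, pvTopOf_cons]

theorem pvRank_eq_two (p : List (String × String)) :
    (pvRank p == 2) = (pvGetKey p "severity" == some "Critical") := by
  unfold pvRank; split_ifs <;> simp_all

theorem pvRank_eq_one (p : List (String × String)) :
    (pvRank p == 1) = (pvGetKey p "severity" == some "High") := by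
  unfold pvRank; split_ifs <;> simp_all

-- ===== VERDICT (by name: the statement is the Claim_ definition above) =====
theorem generate_injury_recommendation_py_spec : Claim_equal_generate_injury_recommendation_py := by
  intro inj healthy _ _
  unfold Spec_generate_injury_recommendation_py
  unfold generate_injury_recommendation_py generate_injury_recommendation_py_alt
  by_cases he : inj.isEmpty
  · simp [he]
  · simp only [he, Bool.false_eq_true, if_false, pvMaxRank_eq]
    by_cases hc : inj.any (fun p => pvGetKey p "severity" == some "Critical")
    · have htop : pvTopOf inj = 2 := by simp [pvTopOf, hc]
      have hfe : (inj.filter (fun p => pvGetKey p "severity" == some "Critical")).isEmpty = false := by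
        simp only [List.isEmpty_eq_false_iff_exists_mem]
        obtain ⟨p, hp, hps⟩ := List.any_eq_true.mp hc
        exact ⟨p, List.mem_filter.mpr ⟨hp, hps⟩⟩
      have hfilter : inj.filter (fun p => pvRank p == 2) = inj.filter (fun p => pvGetKey p "severity" == some "Critical") :=
        List.filter_congr (fun p _ => pvRank_eq_two p)
      simp [htop, hfe, hfilter, pvFmt]
    · by_cases hh : inj.any (fun p => pvGetKey p "severity" == some "High")
      · have htop : pvTopOf inj = 1 := by simp [pvTopOf, hc, hh]
        have hce : (inj.filter (fun p => pvGetKey p "severity" == some "Critical")).isEmpty = true := by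
          simp only [List.isEmpty_iff, List.filter_eq_nil_iff]
          intro p hp hps
          exact hc (List.any_eq_true.mpr ⟨p, hp, hps⟩)
        have hfe : (inj.filter (fun p => pvGetKey p "severity" == some "High")).isEmpty = false := by
          simp only [List.isEmpty_eq_false_iff_exists_mem]
          obtain ⟨p, hp, hps⟩ := List.any_eq_true.mp hh
          exact ⟨p, List.mem_filter.mpr ⟨hp, hps⟩⟩
        have hfilter : inj.filter (fun p => pvRank p == 1) = inj.filter (fun p => pvGetKey p "severity" == some "High") :=
          List.filter_congr (fun p _ => pvRank_eq_one p)
        simp [htop, hce, hfe, hfilter, pvFmt]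
      · have htop : pvTopOf inj = 0 := by simp [pvTopOf, hc, hh]
        have hce : (inj.filter (fun p => pvGetKey p "severity" == some "Critical")).isEmpty = true := by
          simp only [List.isEmpty_iff, List.filter_eq_nil_iff]
          intro p hp hps; exact hc (List.any_eq_true.mpr ⟨p, hp, hps⟩)
        have hhe : (inj.filter (fun p => pvGetKey p "severity" == some "High")).isEmpty = true := by
          simp only [List.isEmpty_iff, List.filter_eq_nil_iff]
          intro p hp hps; exact hh (List.any_eq_true.mpr ⟨p, hp, hps⟩)
        simp [htop, hce, hhe]
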